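-- pv_equiv track=rewrite | github.com/aivle-study/algorithm | codingmasters/3338.py | ret
-- ===== SOURCE A (Python) =====
-- def ret(num,le):#[0,261416,2,3]
--     if le==1:
--         return num
--     result=[0,0,0,0]
--     dicer2={1:[2,2,3],2:[1,1,2,2,3],3:[1,1,1,1,2,2,2,2]}
--     dicer3={1:[1,1,1,2,2],2:[1,1,2],3:[]}
--     for x in range(1,3+1):#받아온 1번 2번 3번 각개수 가져오기
--         if le==2:
--             for c in dicer2[x]:
--                 result[c]+=num[x]
--         if le==3:
--             for c in dicer3[x]:
--                 result[c]+=num[x]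
--
--     return result
-- ===== SOURCE B (Python) =====
-- def ret(num, le):
--     if le == 1:
--         return num
--     if le == 2:
--         return [0,
--                 2 * num[2] + 4 * num[3],
--                 2 * num[1] + 2 * num[2] + 4 * num[3],
--                 num[1] + num[2]]
--     if le == 3:
--         return [0,
--                 3 * num[1] + 2 * num[2],
--                 2 * num[1] + num[2],
--                 0]
--     return [0, 0, 0, 0]
-- ===== Notes on version B (the rewrite author's own statement) =====
-- stated objective: simpler
-- what changed: Replaced the nested loops over hardcoded repetition lists with closed-form linear combinations of num[1..3] per target cell, returning the result list directly.
import Mathlib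
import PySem

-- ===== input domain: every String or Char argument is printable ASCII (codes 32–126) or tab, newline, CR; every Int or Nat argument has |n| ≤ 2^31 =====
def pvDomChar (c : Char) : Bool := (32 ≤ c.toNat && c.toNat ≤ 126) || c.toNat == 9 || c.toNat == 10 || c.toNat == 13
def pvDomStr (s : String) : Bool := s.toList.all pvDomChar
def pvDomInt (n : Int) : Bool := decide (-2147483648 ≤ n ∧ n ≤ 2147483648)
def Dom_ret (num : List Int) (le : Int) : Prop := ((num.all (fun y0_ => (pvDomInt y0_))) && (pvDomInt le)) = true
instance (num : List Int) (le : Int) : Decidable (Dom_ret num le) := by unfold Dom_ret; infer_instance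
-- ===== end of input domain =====

-- B replaces A's nested loops over hardcoded repetition lists by closed-form
-- linear combinations of num[1..3] per output cell (objective: simpler).


-- ===== PORT A =====
-- dicer2 / dicer3 lookups (the keys reached by range(1,4) are exactly 1,2,3)
def dicer2 (x : Int) : List Int :=
  if x = 1 then [2, 2, 3] else if x = 2 then [1, 1, 2, 2, 3] else [1, 1, 1, 1, 2, 2, 2, 2]

def dicer3 (x : Int) : List Int :=
  if x = 1 then [1, 1, 1, 2, 2] else if x = 2 then [1, 1, 2] else []

-- result[c] += num[x]; c,x ∈ {1,2,3} (nonnegative, c in range), so List.set/getD with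
-- .toNat is exact; num[x] via getD is exact under Pre_ret (outside it Python raises)
def bump (num : List Int) (x : Int) (result : List Int) (c : Int) : List Int :=
  result.modify c.toNat (fun v => v + num.getD x.toNat 0)

def ret (num : List Int) (le : Int) : List Int :=
  if le = 1 then num
  else
    (PySem.List.pyRange 1 4 1).foldl (fun result x =>
      let result := if le = 2 then (dicer2 x).foldl (bump num x) result else result
      if le = 3 then (dicer3 x).foldl (bump num x) result else result)
      [0, 0, 0, 0]

-- ===== PORT B =====
def ret_alt (num : List Int) (le : Int) : List Int :=
  if le = 1 then num
  else if le = 2 then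
    [0, 2 * num.getD 2 0 + 4 * num.getD 3 0,
        2 * num.getD 1 0 + 2 * num.getD 2 0 + 4 * num.getD 3 0,
        num.getD 1 0 + num.getD 2 0]
  else if le = 3 then
    [0, 3 * num.getD 1 0 + 2 * num.getD 2 0,
        2 * num.getD 1 0 + num.getD 2 0,
        0]
  else [0, 0, 0, 0]

-- ===== PRECONDITION & SPEC =====
-- Pre_ret excludes exactly the inputs where Python A raises IndexError:
-- le==2 reads num[1],num[2],num[3] (length ≥ 4); le==3 reads num[1],num[2] (length ≥ 3).
def Pre_ret (num : List Int) (le : Int) : Prop :=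
  (le = 2 → 4 ≤ num.length) ∧ (le = 3 → 3 ≤ num.length)
instance (num : List Int) (le : Int) : Decidable (Pre_ret num le) := by unfold Pre_ret; infer_instance

def pvWitness_ret : List Int × Int := ([0, 5, 7, 2], 2)

def Spec_ret (num : List Int) (le : Int) (out : List Int) : Prop := out = ret_alt num le
instance (num : List Int) (le : Int) (out : List Int) : Decidable (Spec_ret num le out) := by unfold Spec_ret; infer_instance

-- ===== CLAIM (what is proved, stated in full; the proofs are below) =====
def Claim_equal_ret : Prop := ∀ (num : List Int) (le : Int), Dom_ret num le → Pre_ret num le → Spec_ret num le (ret num le)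

-- ===== LEMMAS AND PROOFS =====

-- A's fold, fully evaluated for le = 2: each result cell is the left-nested sum of
-- the increments A performs, in A's order (a definitional computation).
set_option maxHeartbeats 4000000 in
theorem ret_two (num : List Int) :
    ret num 2 =
      [0, 0 + num.getD 2 0 + num.getD 2 0 + num.getD 3 0 + num.getD 3 0 + num.getD 3 0 + num.getD 3 0,
          0 + num.getD 1 0 + num.getD 1 0 + num.getD 2 0 + num.getD 2 0 + num.getD 3 0 + num.getD 3 0 + num.getD 3 0 + num.getD 3 0,
          0 + num.getD 1 0 + num.getD 2 0] := rfl

-- same for le = 3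
set_option maxHeartbeats 4000000 in
theorem ret_three (num : List Int) :
    ret num 3 =
      [0, 0 + num.getD 1 0 + num.getD 1 0 + num.getD 1 0 + num.getD 2 0 + num.getD 2 0,
          0 + num.getD 1 0 + num.getD 1 0 + num.getD 2 0,
          0] := rfl

-- for any other le ≠ 1 the fold never touches result
theorem ret_other (num : List Int) (le : Int) (h1 : ¬ le = 1) (h2 : ¬ le = 2) (h3 : ¬ le = 3) :
    ret num le = [0, 0, 0, 0] := by
  simp [ret, h1, h2, h3, PySem.List.pyRange]

-- ===== VERDICT (by name: the statement is the Claim_ definition above) =====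
theorem ret_spec : Claim_equal_ret := by
  intro num le _ _
  unfold Spec_ret
  by_cases h1 : le = 1
  · subst h1; simp [ret, ret_alt]
  · by_cases h2 : le = 2
    · subst h2
      rw [ret_two]
      simp only [ret_alt]
      norm_num
      constructor <;> ring
    · by_cases h3 : le = 3
      · subst h3
        rw [ret_three]
        simp only [ret_alt]
        norm_num
        constructor <;> ring
      · rw [ret_other num le h1 h2 h3]
        simp [ret_alt, h1, h2, h3]
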